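-- pv_equiv track=rewrite | github.com/othmane1244/TECHNO | backend/security.py | validate_input
-- ===== SOURCE A (Python) =====
-- import unicodedata
--
-- _BANNED = [
--     "ignore previous",
--     "ignore all previous",
--     "system:",
--     "[system]",
--     "jailbreak",
--     "forget instructions",
--     "forget all instructions",
--     "new instructions",
--     "disregard",
--     "act as",
--     "you are now",
--     "pretend",
--     "roleplay",
--     "bypass",
--     "</s>",
--     "###",
--     "---",
-- ]
--
-- def validate_input(text: str) -> str:
--     """Filtre les tentatives d'injection de prompts et limite la taille.
--
--     Normalise d'abord en NFKC pour résister aux homoglyphes unicode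
--     (ex: 'ｓｙｓｔｅｍ:' → 'system:').
--     """
--     if not text:
--         return ""
--     normalized = unicodedata.normalize("NFKC", text).lower()
--     for pattern in _BANNED:
--         if pattern in normalized:
--             return ""
--     return text[:2000]
-- ===== SOURCE B (Python) =====
-- import unicodedata
--
-- _BANNED = [
--     "ignore previous",
--     "ignore all previous",
--     "system:",
--     "[system]",
--     "jailbreak",
--     "forget instructions",
--     "forget all instructions",
--     "new instructions",
--     "disregard",
--     "act as",
--     "you are now",
--     "pretend",
--     "roleplay",
--     "bypass",
--     "</s>",
--     "###",
--     "---",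
-- ]
--
-- def validate_input(text: str) -> str:
--     """Position-major scan: one walk over the normalized text, checking at each
--     offset whether any banned pattern starts there (instead of one full
--     substring scan per pattern)."""
--     if not text:
--         return ""
--     normalized = unicodedata.normalize("NFKC", text).lower()
--     for i in range(len(normalized)):
--         for pat in _BANNED:
--             if normalized.startswith(pat, i):
--                 return ""
--     return text[:2000]
-- ===== Notes on version B (the rewrite author's own statement) =====
-- stated objective: alternative
-- what changed: A scans the whole normalized text once per banned pattern via a membership test; B makes a single position-major walk over the text, checking at each offset whether any banned pattern starts there via startswith with an offset, so the per-pattern substring scans disappear.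
import Mathlib
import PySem

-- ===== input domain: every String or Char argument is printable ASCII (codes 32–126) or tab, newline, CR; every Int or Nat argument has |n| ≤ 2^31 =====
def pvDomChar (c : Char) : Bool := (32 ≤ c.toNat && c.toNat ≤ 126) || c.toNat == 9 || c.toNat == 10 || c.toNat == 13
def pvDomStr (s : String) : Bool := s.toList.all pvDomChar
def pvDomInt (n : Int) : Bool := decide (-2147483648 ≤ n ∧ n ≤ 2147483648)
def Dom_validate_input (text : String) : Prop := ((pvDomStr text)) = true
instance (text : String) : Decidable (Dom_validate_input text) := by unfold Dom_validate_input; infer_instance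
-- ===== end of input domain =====

-- B replaces A's per-pattern substring scans by one position-major walk checking banned prefixes at each offset (alternative decomposition, same exact result).


-- ===== PORT A =====
def bannedA : List String :=
  ["ignore previous", "ignore all previous", "system:", "[system]", "jailbreak",
   "forget instructions", "forget all instructions", "new instructions", "disregard",
   "act as", "you are now", "pretend", "roleplay", "bypass", "</s>", "###", "---"]

-- unicodedata.normalize("NFKC", ·) is the identity on the printable-ASCII domain, so only .lower() remains;
-- the pattern loop with early return is List.any over _BANNED (exact on Dom).
def validate_input (text : String) : String :=
  if text = "" then ""
  else
    let normalized := PySem.Str.lower text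
    if bannedA.any (fun pattern => PySem.Str.isIn pattern normalized) then ""
    else PySem.Str.slice text none (some 2000)

-- ===== PORT B =====
def bannedB : List (List Char) :=
  ["ignore previous".toList, "ignore all previous".toList, "system:".toList, "[system]".toList,
   "jailbreak".toList, "forget instructions".toList, "forget all instructions".toList,
   "new instructions".toList, "disregard".toList, "act as".toList, "you are now".toList,
   "pretend".toList, "roleplay".toList, "bypass".toList, "</s>".toList, "###".toList, "---".toList]

-- Source B's 'for i in range(len(normalized)): … normalized.startswith(pat, i)' walked as structural
-- recursion over the suffixes of the normalized character list (startswith at offset i = prefix of drop i).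
def scanB : List Char → Bool
  | [] => false
  | c :: rest => bannedB.any (fun pat => PySem.Chars.startswith (c :: rest) pat) || scanB rest

def validate_input_alt (text : String) : String :=
  if text = "" then ""
  else
    let normalized := PySem.Chars.lower text.toList
    if scanB normalized then ""
    else PySem.Str.slice text none (some 2000)

-- ===== PRECONDITION & SPEC =====
def Spec_validate_input (text : String) (out : String) : Prop := out = validate_input_alt text
instance (text : String) (out : String) : Decidable (Spec_validate_input text out) := by unfold Spec_validate_input; infer_instance

-- ===== CLAIM (what is proved, stated in full; the proofs are below) =====
def Claim_equal_validate_input : Prop := ∀ (text : String), Dom_validate_input text → Spec_validate_input text (validate_input text)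

-- ===== LEMMAS AND PROOFS =====

-- B's one-pass scan finds exactly "some banned pattern is an infix".
theorem scanB_eq_true_iff (cs : List Char) :
    scanB cs = true ↔ ∃ p ∈ bannedB, p <:+: cs := by
  induction cs with
  | nil =>
    simp only [scanB, Bool.false_eq_true, false_iff]
    rintro ⟨p, hp, hinf⟩
    have hnil : p = [] := List.infix_nil.mp hinf
    subst hnil
    revert hp; decide
  | cons c rest ih =>
    simp only [scanB, Bool.or_eq_true, List.any_eq_true, ih,
      PySem.Chars.startswith_iff]
    constructor
    · rintro (⟨p, hp, hpre⟩ | ⟨p, hp, hinf⟩)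
      · exact ⟨p, hp, hpre.isInfix⟩
      · exact ⟨p, hp, hinf.trans (List.suffix_cons c rest).isInfix⟩
    · rintro ⟨p, hp, hinf⟩
      rcases (List.infix_cons_iff).mp hinf with hpre | hinf'
      · exact Or.inl ⟨p, hp, hpre⟩
      · exact Or.inr ⟨p, hp, hinf'⟩

-- A's pattern-major membership loop equals the same infix condition over bannedA.
theorem anyA_iff (s : String) :
    (bannedA.any (fun pattern => PySem.Str.isIn pattern s)) = true ↔
      ∃ p ∈ bannedB, p <:+: s.toList := by
  simp only [List.any_eq_true, PySem.Str.isIn_iff_infix]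
  constructor
  · rintro ⟨p, hp, hinf⟩
    refine ⟨p.toList, ?_, hinf⟩
    fin_cases hp <;> decide
  · rintro ⟨p, hp, hinf⟩
    fin_cases hp <;> exact ⟨_, by decide, hinf⟩

theorem guards_eq (s : String) :
    (bannedA.any (fun pattern => PySem.Str.isIn pattern s)) = scanB s.toList := by
  rw [Bool.eq_iff_iff, anyA_iff, scanB_eq_true_iff]

-- ===== VERDICT (by name: the statement is the Claim_ definition above) =====
theorem validate_input_spec : Claim_equal_validate_input := by
  intro text _
  unfold Spec_validate_input validate_input validate_input_alt
  by_cases h : text = ""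
  · simp [h]
  · simp only [h, if_false]
    have hl : PySem.Chars.lower text.toList = (PySem.Str.lower text).toList := by
      simp [PySem.Str.toList_lower]
    rw [hl, ← guards_eq (PySem.Str.lower text)]
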